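-- pv_equiv track=rewrite | github.com/YuvalShemla/LoSeM-attention | src/math_utils.py | make_doubling_boundaries
-- ===== SOURCE A (Python) =====
-- from typing import Dict, List, Tuple
--
-- def make_doubling_boundaries(n: int) -> List[Tuple[int, int]]:
--     """Doubling group boundaries: sizes 1, 1, 2, 4, 8, ..."""
--     groups = []
--     pos = 0
--     size = 1
--     while pos < n:
--         end = min(pos + size, n)
--         groups.append((pos, end))
--         pos = end
--         if len(groups) >= 2:
--             size *= 2
--     return groups
-- ===== SOURCE B (Python) =====
-- def make_doubling_boundaries(n):
--     """Closed form: interval ends are powers of two capped at n; there are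
--     (n-1).bit_length() power-of-two intervals after the initial (0, 1)."""
--     if n <= 0:
--         return []
--     m = (n - 1).bit_length()
--     return [(0, 1)] + [(1 << i, min(1 << (i + 1), n)) for i in range(m)]
-- ===== Notes on version B (the rewrite author's own statement) =====
-- stated objective: alternative
-- what changed: B replaces A's stateful while-loop (mutating pos/size with a len>=2 doubling guard) by a closed-form construction: it computes the interval count as (n-1).bit_length() and generates each interval (2^i, min(2^(i+1), n)) directly by index.
import Mathlib
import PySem

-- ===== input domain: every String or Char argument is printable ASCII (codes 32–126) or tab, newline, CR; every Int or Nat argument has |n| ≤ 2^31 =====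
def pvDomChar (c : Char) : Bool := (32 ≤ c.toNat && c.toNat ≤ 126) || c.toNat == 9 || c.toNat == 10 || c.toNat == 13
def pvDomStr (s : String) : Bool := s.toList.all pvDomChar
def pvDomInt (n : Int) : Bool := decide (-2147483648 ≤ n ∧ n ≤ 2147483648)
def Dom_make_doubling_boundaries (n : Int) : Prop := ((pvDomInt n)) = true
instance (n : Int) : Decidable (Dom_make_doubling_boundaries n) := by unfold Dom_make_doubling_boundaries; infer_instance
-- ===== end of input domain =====

-- B replaces A's stateful while-loop by a closed form: (n-1).bit_length() intervals
-- (2^i, min(2^(i+1), n)) after the initial (0,1); alternative decomposition, same cost.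

-- ===== PORT A =====
-- A's while loop; fuel = n.toNat + 1 is enough since pos strictly increases each iteration.
def loopA : Nat → Int → Int → List (Int × Int) → Int → List (Int × Int)
  | 0, _, _, groups, _ => groups
  | f+1, pos, size, groups, n =>
    if pos < n then
      let e := min (pos + size) n
      let groups' := groups ++ [(pos, e)]
      loopA f e (if 2 ≤ groups'.length then size * 2 else size) groups' n
    else groups

def make_doubling_boundaries (n : Int) : List (Int × Int) :=
  loopA (n.toNat + 1) 0 1 [] n

-- ===== PORT B =====
-- (n-1).bit_length() on n ≥ 1 is Nat.size (n-1).toNat; 1 << i is 2^i.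
def make_doubling_boundaries_alt (n : Int) : List (Int × Int) :=
  if n ≤ 0 then []
  else
    let m := Nat.size (n - 1).toNat
    (0, 1) :: (List.range m).map (fun i => ((2:Int)^i, min ((2:Int)^(i+1)) n))

-- ===== PRECONDITION & SPEC =====
def Spec_make_doubling_boundaries (n : Int) (out : List (Int × Int)) : Prop := out = make_doubling_boundaries_alt n
instance (n : Int) (out : List (Int × Int)) : Decidable (Spec_make_doubling_boundaries n out) := by unfold Spec_make_doubling_boundaries; infer_instance

-- ===== CLAIM (what is proved, stated in full; the proofs are below) =====
def Claim_equal_make_doubling_boundaries : Prop := ∀ (n : Int), Dom_make_doubling_boundaries n → Spec_make_doubling_boundaries n (make_doubling_boundaries n)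

-- ===== LEMMAS AND PROOFS =====

-- steady-state of A's loop once groups is nonempty (size doubles every step)
def specA : Nat → Int → Int → Int → List (Int × Int)
  | 0, _, _, _ => []
  | f+1, pos, size, n =>
    if pos < n then (pos, min (pos + size) n) :: specA f (min (pos + size) n) (size * 2) n else []

theorem loopA_eq_specA (f : Nat) : ∀ (pos size n : Int) (groups : List (Int × Int)),
    groups ≠ [] → loopA f pos size groups n = groups ++ specA f pos size n := by
  induction f with
  | zero => intro pos size n groups _; simp [loopA, specA]
  | succ f ih =>
    intro pos size n groups hne
    by_cases h : pos < n
    · have hlen : 2 ≤ (groups ++ [(pos, min (pos + size) n)]).length := by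
        have : 1 ≤ groups.length := List.length_pos_iff.mpr hne
        simpa using this
      simp only [loopA, specA, if_pos h, hlen]
      rw [ih _ _ _ _ (by simp)]
      simp
    · simp [loopA, specA, if_neg h]

theorem specA_nil (f : Nat) (pos size n : Int) (h : ¬ pos < n) : specA f pos size n = [] := by
  cases f <;> simp [specA, h]

-- the steady state from pos = size = 2^i is exactly the indexed tail B builds
theorem specA_closed (f : Nat) : ∀ (i : Nat) (n : Int), 0 < n →
    Nat.size (n - 1).toNat ≤ f + i →
    specA f ((2:Int)^i) ((2:Int)^i) n
      = (List.range' i (Nat.size (n - 1).toNat - i)).map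
          (fun j => ((2:Int)^j, min ((2:Int)^(j+1)) n)) := by
  induction f with
  | zero =>
    intro i n hn hf
    simp only [Nat.zero_add] at hf
    rw [Nat.sub_eq_zero_of_le hf]
    simp [specA]
  | succ f ih =>
    intro i n hn hf
    set m := Nat.size (n - 1).toNat with hm
    have hcast : ((2:Int)^i) = ((2^i : Nat) : Int) := by push_cast; ring
    by_cases h : (2:Int)^i < n
    · -- 2^i ≤ n - 1 so (Nat) 2^i ≤ (n-1).toNat, hence i < m
      have hle : (2^i : Nat) ≤ (n - 1).toNat := by omega
      have him : i < m := by rw [hm, Nat.lt_size]; exact hle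
      have hsum : (2:Int)^i + (2:Int)^i = (2:Int)^(i+1) := by ring
      have hmul : (2:Int)^i * 2 = (2:Int)^(i+1) := by ring
      simp only [specA, if_pos h, hsum, hmul]
      have hrange : List.range' i (m - i) = i :: List.range' (i+1) (m - (i+1)) := by
        have : m - i = (m - (i+1)) + 1 := by omega
        rw [this, List.range'_succ]
      rw [hrange]
      by_cases h2 : (2:Int)^(i+1) < n
      · have hminv : min ((2:Int)^(i+1)) n = (2:Int)^(i+1) := min_eq_left (le_of_lt h2)
        rw [List.map_cons, hminv, ih (i+1) n hn (by omega)]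
      · -- last interval: min = n and the recursion stops; also m = i + 1
        have hminv : min ((2:Int)^(i+1)) n = n := min_eq_right (le_of_not_gt h2)
        have hcast2 : ((2:Int)^(i+1)) = ((2^(i+1) : Nat) : Int) := by push_cast; ring
        have hlt : (n - 1).toNat < 2^(i+1) := by omega
        have hmle : m ≤ i + 1 := by rw [hm, Nat.size_le]; exact hlt
        have : m - (i+1) = 0 := by omega
        rw [this, hminv, specA_nil _ _ _ _ (lt_irrefl n)]
        simp [hminv]
    · -- n ≤ 2^i: m ≤ i, nothing to emit
      have hlt : (n - 1).toNat < 2^i := by omega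
      have hmle : m ≤ i := by rw [hm, Nat.size_le]; exact hlt
      rw [Nat.sub_eq_zero_of_le hmle]
      simp [specA, h]

-- ===== VERDICT (by name: the statement is the Claim_ definition above) =====
theorem make_doubling_boundaries_spec : Claim_equal_make_doubling_boundaries := by
  intro n _
  unfold Spec_make_doubling_boundaries make_doubling_boundaries make_doubling_boundaries_alt
  by_cases hn : 0 < n
  · have hn' : ¬ n ≤ 0 := by omega
    have h1 : min (0 + (1:Int)) n = 1 := by omega
    have hfuel : Nat.size (n - 1).toNat ≤ n.toNat + 0 := by
      have h2 := Nat.size_le.mpr (Nat.lt_two_pow_self (n := (n - 1).toNat))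
      have h3 : (n - 1).toNat + 1 ≤ n.toNat + 1 := by omega
      omega
    have hA : loopA (n.toNat + 1) 0 1 [] n = [(0, 1)] ++ specA n.toNat 1 1 n := by
      simp only [loopA, if_pos hn, h1]
      simpa using loopA_eq_specA n.toNat 1 1 n [(0, 1)] (by simp)
    have hpow : ((2:Int)^0) = 1 := by norm_num
    have hclosed := specA_closed n.toNat 0 n hn hfuel
    rw [hpow] at hclosed
    rw [hA, hclosed, if_neg hn']
    simp [List.range_eq_range']
  · have hA : loopA (n.toNat + 1) 0 1 [] n = [] := by simp [loopA, hn]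
    rw [hA, if_pos (by omega)]
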